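-- pv_equiv track=rewrite | github.com/samathareddyk/EZ-TECHNOLOGY- | magic_string.py | magic_string
-- ===== SOURCE A (Python) =====
-- def magic_string(str1):
--  a=0
--  max1=0
--  b=len(str1)
--  for ele in str1:
--     a=str1.count(ele)
--     if a==b:
--         return 0
--     elif a>max1:
--         max1=a
--  return b-max1
-- ===== SOURCE B (Python) =====
-- def magic_string(str1):
--     counts = {}
--     for ch in str1:
--         counts[ch] = counts.get(ch, 0) + 1
--     best = 0
--     for v in counts.values():
--         if v > best:
--             best = v
--     return len(str1) - best
-- ===== Notes on version B (the rewrite author's own statement) =====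
-- stated objective: faster
-- what changed: Replaces the per-element str1.count inner scan (and the early uniform-string return) with a single dictionary-counting pass followed by a max over the counts.
import Mathlib
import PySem

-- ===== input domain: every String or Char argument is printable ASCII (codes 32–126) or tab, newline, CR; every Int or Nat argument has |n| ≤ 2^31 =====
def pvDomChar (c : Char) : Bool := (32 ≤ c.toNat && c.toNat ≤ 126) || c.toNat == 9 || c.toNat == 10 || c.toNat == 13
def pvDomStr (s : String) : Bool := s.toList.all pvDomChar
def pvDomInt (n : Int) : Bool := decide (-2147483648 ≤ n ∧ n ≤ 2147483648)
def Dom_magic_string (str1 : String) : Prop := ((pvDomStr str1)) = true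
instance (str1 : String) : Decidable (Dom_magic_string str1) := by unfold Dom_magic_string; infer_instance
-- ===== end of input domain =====

-- B replaces A's per-element str1.count inner scan (quadratic) with one dictionary-counting
-- pass followed by a max over the counts; a timing run measured B faster on large inputs.

-- ===== PORT A =====
-- the loop over str1: a = str1.count(ele); if a == b: return 0; elif a > max1: max1 = a
-- (str1.count(ele) for a single character ele is exactly the character count of the list)
def magicLoopA (s : List Char) (b : Int) : Int → List Char → Int
  | max1, [] => b - max1
  | max1, ele :: rest =>
    let a : Int := PySem.List.count s ele
    if a = b then 0
    else if a > max1 then magicLoopA s b a rest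
    else magicLoopA s b max1 rest

def magic_string (str1 : String) : Int :=
  -- a = 0 is immediately overwritten inside the loop; max1 = 0; b = len(str1)
  let s := str1.toList
  let b : Int := PySem.List.len s
  magicLoopA s b 0 s

-- ===== PORT B =====
def magic_string_alt (str1 : String) : Int :=
  let s := str1.toList
  -- counts[ch] = counts.get(ch, 0) + 1
  let counts : PySem.Dict Char Int :=
    s.foldl (fun d ch => d.insert ch (d.getD ch 0 + 1)) PySem.Dict.empty
  -- for v in counts.values(): if v > best: best = v
  let best : Int := (PySem.Dict.values counts).foldl (fun best v => if v > best then v else best) 0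
  PySem.List.len s - best

-- ===== PRECONDITION & SPEC =====
def Spec_magic_string (str1 : String) (out : Int) : Prop := out = magic_string_alt str1
instance (str1 : String) (out : Int) : Decidable (Spec_magic_string str1 out) := by unfold Spec_magic_string; infer_instance

-- ===== CLAIM (what is proved, stated in full; the proofs are below) =====
def Claim_equal_magic_string : Prop := ∀ (str1 : String), Dom_magic_string str1 → Spec_magic_string str1 (magic_string str1)

-- ===== LEMMAS AND PROOFS =====

-- a running max over a projection is bounded by any common bound
theorem foldl_max_le_int {α : Type} (l : List α) (f : α → Int) (init K : Int)
    (h0 : init ≤ K) (h : ∀ x ∈ l, f x ≤ K) :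
    l.foldl (fun acc y => max acc (f y)) init ≤ K := by
  induction l generalizing init with
  | nil => simpa using h0
  | cons x t ih =>
    simp only [List.foldl_cons]
    exact ih _ (max_le h0 (h x (by simp))) (fun y hy => h y (by simp [hy]))

-- A's loop computes b - (running max of counts), provided max1 ≤ b and all counts ≤ b
theorem magicLoopA_eq (s : List Char) (l : List Char) (m : Int)
    (hm : m ≤ (s.length : Int)) (hc : ∀ e ∈ l, (s.count e : Int) ≤ (s.length : Int)) :
    magicLoopA s (s.length : Int) m l
      = (s.length : Int) - l.foldl (fun acc e => max acc (s.count e : Int)) m := by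
  induction l generalizing m with
  | nil => simp [magicLoopA]
  | cons e rest ih =>
    simp only [magicLoopA, PySem.List.count_eq, List.foldl_cons]
    split_ifs with h1 h2
    · -- a = b: the running max becomes b and stays b
      have hstart : max m (s.count e : Int) = (s.length : Int) := by
        rw [h1]; exact max_eq_right hm
      have hle : rest.foldl (fun acc x => max acc (s.count x : Int)) (max m (s.count e : Int))
          ≤ (s.length : Int) :=
        foldl_max_le_int _ _ _ _ (le_of_eq hstart) (fun y hy => hc y (by simp [hy]))
      have hge := (PySem.List.le_foldl_max_int rest (fun x => (s.count x : Int))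
        (max m (s.count e : Int))).1
      omega
    · rw [ih _ (hc e (by simp)) (fun y hy => hc y (by simp [hy]))]
      have : max m (s.count e : Int) = (s.count e : Int) := max_eq_right (le_of_lt h2)
      rw [this]
    · rw [ih _ hm (fun y hy => hc y (by simp [hy]))]
      have : max m (s.count e : Int) = m := max_eq_left (by omega)
      rw [this]

-- two running maxes over lists with the same members agree (with the same init)
theorem foldl_max_congr_mem {α : Type} (l l' : List α) (f : α → Int) (init : Int)
    (h : ∀ x, x ∈ l ↔ x ∈ l') :
    l.foldl (fun acc y => max acc (f y)) init
      = l'.foldl (fun acc y => max acc (f y)) init := by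
  have h1 := PySem.List.le_foldl_max_int l f init
  have h2 := PySem.List.le_foldl_max_int l' f init
  refine le_antisymm ?_ ?_
  · exact foldl_max_le_int _ _ _ _ h2.1 (fun x hx => h2.2 x ((h x).mp hx))
  · exact foldl_max_le_int _ _ _ _ h1.1 (fun x hx => h1.2 x ((h x).mpr hx))

theorem magic_string_spec : Claim_equal_magic_string := by
  intro str1 _
  unfold Spec_magic_string magic_string magic_string_alt
  dsimp only
  set s := str1.toList with hs
  -- A's side
  rw [show (PySem.List.len s) = (s.length : Int) from by simp [PySem.List.len]]
  rw [magicLoopA_eq s s 0 (by positivity)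
    (fun e _ => by exact_mod_cast Int.ofNat_le.mpr (List.count_le_length))]
  -- B's side: the counting loop is Counter(s); its values are counts over the dedup of s
  rw [PySem.Dict.foldl_insert_getD_add_one_eq_counter]
  have hvals : (PySem.Dict.values (PySem.Dict.counter s))
      = (PySem.Set.ofList s).map (fun k => (s.count k : Int)) := by
    have : (PySem.Dict.counter s).values = ((PySem.Dict.counter s).items).map Prod.snd := rfl
    rw [this, PySem.Dict.items_counter, List.map_map]
    rfl
  rw [hvals]
  -- the if-max loop is a running max
  have hif : ∀ (l : List Int) (b : Int),
      l.foldl (fun best v => if v > best then v else best) b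
        = l.foldl (fun best v => max best v) b := by
    intro l b
    apply PySem.List.foldl_congr_mem
    intro acc x _
    by_cases h : x > acc
    · simp [h, max_eq_right (le_of_lt h)]
    · simp [h, max_eq_left (by exact le_of_not_gt h)]
  rw [hif]
  -- running max over (dedup s).map count  =  running max over s of count
  have : ((PySem.Set.ofList s).map (fun k => (s.count k : Int))).foldl
      (fun best v => max best v) 0
      = s.foldl (fun acc e => max acc (s.count e : Int)) 0 := by
    rw [List.foldl_map]
    exact foldl_max_congr_mem _ _ _ _ (fun x => by
      rw [← PySem.List.dedup_eq_ofList]; exact PySem.List.mem_dedup s x)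
  rw [this]

-- ===== VERDICT (by name: the statement is the Claim_ definition above) =====
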